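-- pv_equiv track=rewrite | github.com/TheorieLearn/TheorieLearn | serverFilesCourse/theorielearn/graph_construction/server_base.py | is_describing_vertex
-- ===== SOURCE A (Python) =====
-- def is_describing_vertex(
--     v_orig: str, special_vertices: list[set[str]], avoid: bool
-- ) -> bool:
--     if not special_vertices:
--         return True
--
--     for special_vertex in special_vertices:
--         if not avoid and v_orig not in special_vertex:
--             return False
--         elif avoid and v_orig in special_vertex:
--             return False
--
--     return True
-- ===== SOURCE B (Python) =====
-- def is_describing_vertex(
--     v_orig: str, special_vertices: list[set[str]], avoid: bool
-- ) -> bool: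
--     if not special_vertices:
--         return True
--     if avoid:
--         combined = set().union(*special_vertices)
--         return v_orig not in combined
--     combined = set.intersection(*special_vertices)
--     return v_orig in combined
-- ===== Notes on version B (the rewrite author's own statement) =====
-- stated objective: alternative
-- what changed: B aggregates the list of sets into one combined set (union of all sets when avoid, intersection of all sets otherwise) and does a single membership test, instead of A's per-set short-circuited scan with per-element branching.
import Mathlib
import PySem

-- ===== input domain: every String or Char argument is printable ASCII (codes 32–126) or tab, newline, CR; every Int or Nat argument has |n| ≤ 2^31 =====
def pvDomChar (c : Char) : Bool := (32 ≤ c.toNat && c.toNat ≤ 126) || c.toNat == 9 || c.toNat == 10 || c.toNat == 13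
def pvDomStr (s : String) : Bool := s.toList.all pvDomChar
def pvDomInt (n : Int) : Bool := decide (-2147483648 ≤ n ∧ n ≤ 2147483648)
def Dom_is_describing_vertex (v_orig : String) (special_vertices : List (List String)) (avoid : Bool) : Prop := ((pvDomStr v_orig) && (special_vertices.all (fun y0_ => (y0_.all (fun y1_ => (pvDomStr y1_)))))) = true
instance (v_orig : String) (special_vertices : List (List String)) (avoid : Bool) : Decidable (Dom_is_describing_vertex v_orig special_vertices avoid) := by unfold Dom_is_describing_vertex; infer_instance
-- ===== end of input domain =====

-- B aggregates the sets into one combined set (union if avoid, intersection otherwise) and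
-- does a single membership test, instead of A's per-set short-circuited scan (alternative).


-- ===== PORT A =====
-- the for-loop of A: returns false as soon as a set fails the membership condition
def isdvLoop (v_orig : String) (avoid : Bool) : List (List String) → Bool
  | [] => true
  | special_vertex :: rest =>
    if !avoid && !(special_vertex.contains v_orig) then false
    else if avoid && special_vertex.contains v_orig then false
    else isdvLoop v_orig avoid rest

def is_describing_vertex (v_orig : String) (special_vertices : List (List String)) (avoid : Bool) : Bool :=
  if special_vertices.isEmpty then true
  else isdvLoop v_orig avoid special_vertices

-- ===== PORT B =====
def is_describing_vertex_alt (v_orig : String) (special_vertices : List (List String)) (avoid : Bool) : Bool :=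
  match special_vertices with
  | [] => true
  | s :: rest =>
    if avoid then
      -- combined = set().union(*special_vertices); return v_orig not in combined
      let combined := (s :: rest).foldl (fun acc t => PySem.Set.union acc t) PySem.Set.empty
      !(PySem.Set.contains combined v_orig)
    else
      -- combined = set.intersection(*special_vertices); return v_orig in combined
      let combined := rest.foldl (fun acc t => PySem.Set.inter acc t) (PySem.Set.ofList s)
      PySem.Set.contains combined v_orig

-- ===== PRECONDITION & SPEC =====
def Spec_is_describing_vertex (v_orig : String) (special_vertices : List (List String)) (avoid : Bool) (out : Bool) : Prop := out = is_describing_vertex_alt v_orig special_vertices avoid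
instance (v_orig : String) (special_vertices : List (List String)) (avoid : Bool) (out : Bool) : Decidable (Spec_is_describing_vertex v_orig special_vertices avoid out) := by unfold Spec_is_describing_vertex; infer_instance

-- ===== CLAIM (what is proved, stated in full; the proofs are below) =====
def Claim_equal_is_describing_vertex : Prop := ∀ (v_orig : String) (special_vertices : List (List String)) (avoid : Bool), Dom_is_describing_vertex v_orig special_vertices avoid → Spec_is_describing_vertex v_orig special_vertices avoid (is_describing_vertex v_orig special_vertices avoid)

-- ===== LEMMAS AND PROOFS =====

-- A's loop is "no set contains v" when avoid, "every set contains v" otherwise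
theorem isdvLoop_eq (v : String) (avoid : Bool) (svs : List (List String)) :
    isdvLoop v avoid svs =
      (if avoid then !(svs.any (fun s => s.contains v)) else svs.all (fun s => s.contains v)) := by
  induction svs with
  | nil => cases avoid <;> simp [isdvLoop]
  | cons s rest ih =>
    cases avoid <;> by_cases h : s.contains v <;> simp [isdvLoop, h, ih]

-- membership in the folded union
theorem mem_foldl_union (v : String) (svs : List (List String)) (acc : PySem.Set String) :
    (v ∈ svs.foldl (fun a t => PySem.Set.union a t) acc) ↔ (v ∈ acc ∨ ∃ s ∈ svs, v ∈ s) := by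
  induction svs generalizing acc with
  | nil => simp
  | cons s rest ih =>
    simp [List.foldl, ih, PySem.Set.mem_union]
    tauto

-- membership in the folded intersection
theorem mem_foldl_inter (v : String) (svs : List (List String)) (acc : PySem.Set String) :
    (v ∈ svs.foldl (fun a t => PySem.Set.inter a t) acc) ↔ (v ∈ acc ∧ ∀ s ∈ svs, v ∈ s) := by
  induction svs generalizing acc with
  | nil => simp
  | cons s rest ih =>
    simp [List.foldl, ih, PySem.Set.mem_inter]
    tauto

-- ===== VERDICT (by name: the statement is the Claim_ definition above) =====
theorem is_describing_vertex_spec : Claim_equal_is_describing_vertex := by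
  intro v svs avoid _
  unfold Spec_is_describing_vertex
  cases svs with
  | nil => cases avoid <;> rfl
  | cons s rest =>
    simp only [is_describing_vertex, is_describing_vertex_alt, List.isEmpty_cons,
      if_neg Bool.false_ne_true]
    rw [isdvLoop_eq]
    cases avoid with
    | false =>
      rw [if_neg (by decide : ¬ (false = true)), if_neg (by decide : ¬ (false = true)),
        Bool.eq_iff_iff]
      simp [mem_foldl_inter]
    | true =>
      rw [if_pos rfl, if_pos rfl, Bool.eq_iff_iff]
      simp [mem_foldl_union, PySem.Set.empty]
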